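-- pv_equiv track=rewrite | github.com/gcp825/advent_of_code | 2019/python/17.py | determine_moves
-- ===== SOURCE A (Python) =====
-- def determine_moves(g):
--
--     g2   = ['.'*len(g[0])] + g + ['.'*len(g[0])];  grid = [list('.'+''.join(g2[x])+'.') for x in range(len(g2))]
--
--     left = {'^':'<','>':'^','v':'>','<':'v'};  right = dict([(v,k) for k,v in left.items()])
--
--     moves = [];  distance = 0;  y,x = [(y,x) for y,row in enumerate(grid) for x,z in enumerate(row) if z in '^v<>'][0];  d = grid[y][x]
--
--     while grid[y][x] != '.':
--         next_y, next_x, left_y, left_x = (y-1,x,y,x-1) if d == '^' else (y+1,x,y,x+1) if d == 'v' else (y,x-1,y+1,x) if d == '<' else (y,x+1,y-1,x)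
--         if grid[next_y][next_x] == '.':
--             if distance > 0:
--                 moves += [str(distance)]
--                 distance = 0
--             move, d = ('L',left[d]) if grid[left_y][left_x] == '#' else ('R',right[d])
--             moves += [move]
--         distance += 1
--         y,x = (y if d in '<>' else y-1 if d == '^' else y+1,  x if d in '^v' else x-1 if d == '<' else x+1)
--
--     return moves[:-1]
-- ===== SOURCE B (Python) =====
-- def determine_moves(g):
--
--     g2 = ['.'*len(g[0])] + g + ['.'*len(g[0])]
--     grid = [list('.' + ''.join(g2[i]) + '.') for i in range(len(g2))]
--
--     left = {'^':'<','>':'^','v':'>','<':'v'}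
--     right = dict([(v,k) for k,v in left.items()])
--
--     y, x = [(i,j) for i,row in enumerate(grid) for j,c in enumerate(row) if c in '^v<>'][0]
--     d = grid[y][x]
--
--     def ahead(y, x, d):
--         return (y-1,x) if d == '^' else (y+1,x) if d == 'v' else (y,x-1) if d == '<' else (y,x+1)
--
--     def leftpos(y, x, d):
--         return (y,x-1) if d == '^' else (y,x+1) if d == 'v' else (y+1,x) if d == '<' else (y-1,x)
--
--     moves = []
--
--     # initial straight run (the robot may walk before its first turn)
--     k = 0
--     ny, nx = ahead(y, x, d)
--     while grid[ny][nx] != '.':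
--         y, x = ny, nx
--         k += 1
--         ny, nx = ahead(y, x, d)
--     if k:
--         moves.append(str(k))
--
--     # one outer iteration per turn: turn letter, then an inner straight run
--     while True:
--         ly, lx = leftpos(y, x, d)
--         t, d = ('L', left[d]) if grid[ly][lx] == '#' else ('R', right[d])
--         ny, nx = ahead(y, x, d)
--         if grid[ny][nx] == '.':
--             return moves
--         moves.append(t)
--         k = 0
--         while grid[ny][nx] != '.':
--             y, x = ny, nx
--             k += 1
--             ny, nx = ahead(y, x, d)
--         moves.append(str(k))
-- ===== Notes on version B (the rewrite author's own statement) =====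
-- stated objective: alternative
-- what changed: A is one flat per-cell while loop juggling a distance flag (flush on turn, spurious final turn letter stripped by moves[:-1]); B decomposes the walk into segments: an initial straight run, then one outer iteration per turn that emits the turn letter and an inner straight run counting the segment, stopping before the spurious final turn so no strip is needed.
import Mathlib
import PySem

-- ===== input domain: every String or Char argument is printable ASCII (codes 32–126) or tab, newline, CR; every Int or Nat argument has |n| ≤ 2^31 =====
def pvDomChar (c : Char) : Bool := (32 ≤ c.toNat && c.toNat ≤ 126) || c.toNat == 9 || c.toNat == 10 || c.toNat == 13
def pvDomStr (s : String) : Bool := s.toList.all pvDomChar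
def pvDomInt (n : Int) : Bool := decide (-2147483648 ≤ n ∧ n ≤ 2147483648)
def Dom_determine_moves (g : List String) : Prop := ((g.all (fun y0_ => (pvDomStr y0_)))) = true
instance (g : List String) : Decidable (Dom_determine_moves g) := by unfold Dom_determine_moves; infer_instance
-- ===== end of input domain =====

-- B replaces A's single per-cell loop (distance flag, flush, trailing [:-1] strip) by a segment
-- decomposition: an initial straight run, then one outer iteration per turn emitting the turn letter
-- and an inner straight run counting the segment; same return value on every input A returns on.

-- ===== SHARED HELPERS (both Pythons pad the grid, locate the robot and use the same geometry) =====

/-- one padded grid cell, Python `grid[y][x]` (none = IndexError). -/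
def pvCell (grid : List (List Char)) (y x : Int) : Option Char :=
  (PySem.List.pyGet? grid y).bind fun row => PySem.List.pyGet? row x

/-- the padded grid: a '.'-row above and below, a '.' column left and right (both Pythons, verbatim). -/
def pvPad (g : List String) : List (List Char) :=
  let dots := List.replicate (g.headD "").toList.length '.'
  let g2 := dots :: (g.map String.toList ++ [dots])
  g2.map fun r => '.' :: (r ++ ['.'])

/-- `c in '^v<>'`. -/
def pvIsRobot (c : Char) : Bool := c = '^' || c = 'v' || c = '<' || c = '>'

/-- first robot char in one row, scanning left to right from column j. -/
def pvFindRow : List Char → Int → Option (Int × Char)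
  | [], _ => none
  | c :: cs, j => if pvIsRobot c then some (j, c) else pvFindRow cs (j + 1)

/-- first robot char in the grid, row-major (the `[0]` of A's comprehension). -/
def pvFindRows : List (List Char) → Int → Option (Int × Int × Char)
  | [], _ => none
  | r :: rs, i =>
    match pvFindRow r 0 with
    | some (j, c) => some (i, j, c)
    | none => pvFindRows rs (i + 1)

def pvFind (grid : List (List Char)) : Option (Int × Int × Char) := pvFindRows grid 0

/-- the cell ahead of (y,x) when heading d (A's next/step tuple and B's `ahead`, identical formulas). -/
def pvAheadPos (y x : Int) (d : Char) : Int × Int :=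
  if d = '^' then (y - 1, x) else if d = 'v' then (y + 1, x)
  else if d = '<' then (y, x - 1) else (y, x + 1)

/-- the cell to the robot's left (A's left tuple and B's `leftpos`). -/
def pvLeftPos (y x : Int) (d : Char) : Int × Int :=
  if d = '^' then (y, x - 1) else if d = 'v' then (y, x + 1)
  else if d = '<' then (y + 1, x) else (y - 1, x)

/-- the `left` dict (d is always one of '^v<>', so a total match is exact). -/
def pvTurnL (d : Char) : Char :=
  if d = '^' then '<' else if d = '>' then '^' else if d = 'v' then '>' else if d = '<' then 'v' else d

/-- the `right` dict (inverse pairs of `left`). -/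
def pvTurnR (d : Char) : Char :=
  if d = '<' then '^' else if d = '^' then '>' else if d = '>' then 'v' else if d = 'v' then '<' else d

/-- fuel: a terminating run never repeats a (cell, direction) state, so it has fewer
iterations than 4 · rows · cols of the padded grid; none = IndexError or divergence. -/
def pvFuel (g : List String) : Nat :=
  4 * (g.length + 2) * ((g.map fun s => s.toList.length).foldl max 0 + 2) + 4

-- ===== PORT A =====

/-- A's single while loop, one fuel unit per iteration: flush the distance and turn when the cell
ahead is '.', then always step once and bump `distance`. -/
def pvRunA (grid : List (List Char)) : Nat → Int → Int → Char → Int → List String → Option (List String)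
  | 0, _, _, _, _, _ => none
  | n + 1, y, x, d, dist, mv =>
    match pvCell grid y x with
    | none => none
    | some c =>
      if c = '.' then some mv
      else
        match pvCell grid (pvAheadPos y x d).1 (pvAheadPos y x d).2 with
        | none => none
        | some nc =>
          if nc = '.' then
            let mv1 := if dist > 0 then mv ++ [PySem.Int.toStr dist] else mv
            match pvCell grid (pvLeftPos y x d).1 (pvLeftPos y x d).2 with
            | none => none
            | some lc =>
              let td : String × Char := if lc = '#' then ("L", pvTurnL d) else ("R", pvTurnR d)
              pvRunA grid n (pvAheadPos y x td.2).1 (pvAheadPos y x td.2).2 td.2 1 (mv1 ++ [td.1])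
          else
            pvRunA grid n (pvAheadPos y x d).1 (pvAheadPos y x d).2 d (dist + 1) mv

def determine_moves (g : List String) : List String :=
  let grid := pvPad g
  match pvFind grid with
  | none => []    -- Python raises IndexError here (no robot / empty g); excluded by Pre_
  | some (y, x, d) =>
    match pvRunA grid (pvFuel g) y x d 0 [] with
    | some mv => PySem.List.slice mv none (some (-1))   -- moves[:-1]
    | none => []  -- IndexError or divergence; excluded by Pre_

-- ===== PORT B =====

/-- B's straight-run while loop: step while the cell ahead is not '.', counting steps into k. -/
def pvStraightB (grid : List (List Char)) : Nat → Int → Int → Char → Int → Option (Int × Int × Int)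
  | 0, _, _, _, _ => none
  | n + 1, y, x, d, k =>
    match pvCell grid (pvAheadPos y x d).1 (pvAheadPos y x d).2 with
    | none => none
    | some c =>
      if c = '.' then some (y, x, k)
      else pvStraightB grid n (pvAheadPos y x d).1 (pvAheadPos y x d).2 d (k + 1)

/-- B's outer loop, one fuel unit per turn: turn letter, stop if the new heading faces '.',
else emit the letter and the inner run's length. -/
def pvTurnsB (grid : List (List Char)) : Nat → Int → Int → Char → List String → Option (List String)
  | 0, _, _, _, _ => none
  | n + 1, y, x, d, mv =>
    match pvCell grid (pvLeftPos y x d).1 (pvLeftPos y x d).2 with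
    | none => none
    | some lc =>
      let td : String × Char := if lc = '#' then ("L", pvTurnL d) else ("R", pvTurnR d)
      match pvCell grid (pvAheadPos y x td.2).1 (pvAheadPos y x td.2).2 with
      | none => none
      | some c =>
        if c = '.' then some mv
        else
          match pvStraightB grid (n + 1) y x td.2 0 with
          | none => none
          | some (y2, x2, k) => pvTurnsB grid n y2 x2 td.2 (mv ++ [td.1, PySem.Int.toStr k])

def determine_moves_alt (g : List String) : List String :=
  let grid := pvPad g
  match pvFind grid with
  | none => []    -- Python raises here; excluded by Pre_
  | some (y, x, d) =>
    match pvStraightB grid (pvFuel g) y x d 0 with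
    | none => []
    | some (y1, x1, k) =>
      let mv := if k > 0 then [PySem.Int.toStr k] else []
      (pvTurnsB grid (pvFuel g) y1 x1 d mv).getD []

-- ===== PRECONDITION & SPEC =====
-- Pre_ holds exactly when Python A returns (coverage: it excludes no input A returns on). A's
-- domain is NOT a shape condition: A raises IndexError when no robot char exists, and mid-walk on
-- ragged rows, and it genuinely DIVERGES on cyclic scaffolds (e.g. [">#", "##"]) — which inputs
-- those are depends on the whole walk, so termination can only be stated via the run itself
-- (pvFuel bounds every terminating run: a terminating walk never repeats a (cell, direction)
-- state, hence has at most 4·rows·cols iterations).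
def Pre_determine_moves (g : List String) : Prop :=
  ((pvFind (pvPad g)).bind fun s =>
      pvRunA (pvPad g) (pvFuel g) s.1 s.2.1 s.2.2 0 []).isSome = true
instance (g : List String) : Decidable (Pre_determine_moves g) := by
  unfold Pre_determine_moves; infer_instance

def pvWitness_determine_moves : List String := ["..v..", "..#..", "..##."]

def Spec_determine_moves (g : List String) (out : List String) : Prop := out = determine_moves_alt g
instance (g : List String) (out : List String) : Decidable (Spec_determine_moves g out) := by
  unfold Spec_determine_moves; infer_instance

-- ===== CLAIM (what is proved, stated in full; the proofs are below) =====
def Claim_equal_determine_moves : Prop :=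
  ∀ (g : List String), Dom_determine_moves g → Pre_determine_moves g →
    Spec_determine_moves g (determine_moves g)

-- ===== LEMMAS AND PROOFS =====

/-- more fuel never changes a straight run that finished. -/
theorem pvStraightB_mono (grid : List (List Char)) :
    ∀ n y x d k v, pvStraightB grid n y x d k = some v →
      pvStraightB grid (n + 1) y x d k = some v := by
  intro n
  induction n with
  | zero => intro y x d k v h; simp [pvStraightB] at h
  | succ m ih =>
    intro y x d k v h
    rw [pvStraightB] at h ⊢
    cases hc : pvCell grid (pvAheadPos y x d).1 (pvAheadPos y x d).2 with
    | none => simp [hc] at h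
    | some c =>
      simp only [hc] at h ⊢
      by_cases hdot : c = '.'
      · simpa [hdot] using h
      · simp only [if_neg hdot] at h ⊢
        exact ih _ _ d (k + 1) v h

/-- more fuel never changes an outer run that finished. -/
theorem pvTurnsB_mono (grid : List (List Char)) :
    ∀ n y x d mv v, pvTurnsB grid n y x d mv = some v →
      pvTurnsB grid (n + 1) y x d mv = some v := by
  intro n
  induction n with
  | zero => intro y x d mv v h; simp [pvTurnsB] at h
  | succ m ih =>
    intro y x d mv v h
    rw [pvTurnsB] at h ⊢
    cases hl : pvCell grid (pvLeftPos y x d).1 (pvLeftPos y x d).2 with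
    | none => simp [hl] at h
    | some lc =>
      simp only [hl] at h ⊢
      set td : String × Char := if lc = '#' then ("L", pvTurnL d) else ("R", pvTurnR d) with htd
      cases hc : pvCell grid (pvAheadPos y x td.2).1 (pvAheadPos y x td.2).2 with
      | none => simp [hc] at h
      | some c =>
        simp only [hc] at h ⊢
        by_cases hdot : c = '.'
        · simpa [hdot] using h
        · simp only [if_neg hdot] at h ⊢
          cases hs : pvStraightB grid (m + 1) y x td.2 0 with
          | none => simp [hs] at h
          | some w =>
            simp only [hs] at h
            rw [pvStraightB_mono grid (m + 1) _ _ _ _ _ hs]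
            obtain ⟨y2, x2, k⟩ := w
            simp only at h ⊢
            exact ih y2 x2 td.2 _ v h

/-- a straight run only ever increases its counter. -/
theorem pvStraightB_k_le (grid : List (List Char)) :
    ∀ n y x d k y' x' k', pvStraightB grid n y x d k = some (y', x', k') → k ≤ k' := by
  intro n
  induction n with
  | zero => intro y x d k y' x' k' h; simp [pvStraightB] at h
  | succ m ih =>
    intro y x d k y' x' k' h
    rw [pvStraightB] at h
    cases hc : pvCell grid (pvAheadPos y x d).1 (pvAheadPos y x d).2 with
    | none => simp [hc] at h
    | some c =>
      simp only [hc] at h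
      by_cases hdot : c = '.'
      · simp [hdot] at h; omega
      · simp only [if_neg hdot] at h
        have := ih _ _ d (k + 1) y' x' k' h
        omega

/-- flushing before appending is appending the flush. -/
theorem pvAppend_ite (mv : List String) (P : Prop) [Decidable P] (a : String) :
    (if P then mv ++ [a] else mv) = mv ++ (if P then [a] else []) := by
  split <;> simp

/-- the bridge: from any non-'.' cell, A's flat loop produces (up to the final stripped turn letter)
exactly B's straight run followed by B's turn loop. -/
theorem pvBridge (grid : List (List Char)) :
    ∀ n y x d dist mv r c, pvCell grid y x = some c → c ≠ '.' →
      pvRunA grid n y x d dist mv = some r →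
      ∃ y' x' k, pvStraightB grid n y x d dist = some (y', x', k) ∧
        pvTurnsB grid n y' x' d
          (mv ++ (if k > 0 then [PySem.Int.toStr k] else [])) = some r.dropLast := by
  intro n
  induction n with
  | zero => intro y x d dist mv r c hcell hdot hrun; simp [pvRunA] at hrun
  | succ n ih =>
    intro y x d dist mv r c hcell hdot hrun
    rw [pvRunA] at hrun
    simp only [hcell, if_neg hdot] at hrun
    cases hn : pvCell grid (pvAheadPos y x d).1 (pvAheadPos y x d).2 with
    | none => simp [hn] at hrun
    | some nc =>
      simp only [hn] at hrun
      by_cases hnc : nc = '.'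
      · -- turn case
        simp only [if_pos hnc] at hrun
        cases hl : pvCell grid (pvLeftPos y x d).1 (pvLeftPos y x d).2 with
        | none => simp [hl] at hrun
        | some lc =>
          simp only [hl] at hrun
          rw [pvAppend_ite] at hrun
          have hsg : pvStraightB grid (n + 1) y x d dist = some (y, x, dist) := by
            rw [pvStraightB]; simp [hn, hnc]
          refine ⟨y, x, dist, hsg, ?_⟩
          rw [pvTurnsB]
          simp only [hl]
          generalize htd : (if lc = '#' then (("L" : String), pvTurnL d) else ("R", pvTurnR d)) = td at hrun ⊢
          cases hc2 : pvCell grid (pvAheadPos y x td.2).1 (pvAheadPos y x td.2).2 with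
          | none =>
            cases n with
            | zero => simp [pvRunA] at hrun
            | succ m => rw [pvRunA] at hrun; simp [hc2] at hrun
          | some c2 =>
            simp only []
            by_cases hc2dot : c2 = '.'
            · cases n with
              | zero => simp [pvRunA] at hrun
              | succ m =>
                rw [pvRunA] at hrun
                simp only [hc2, if_pos hc2dot, Option.some_inj] at hrun
                subst hrun
                rw [if_pos hc2dot]
                simp
            · obtain ⟨y', x', k, hs, ht⟩ :=
                ih (pvAheadPos y x td.2).1 (pvAheadPos y x td.2).2 td.2 1
                  (mv ++ (if dist > 0 then [PySem.Int.toStr dist] else []) ++ [td.1]) r c2 hc2 hc2dot hrun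
              have hk1 : (1 : Int) ≤ k := pvStraightB_k_le grid n _ _ _ _ _ _ _ hs
              have hs0 : pvStraightB grid (n + 1) y x td.2 0 = some (y', x', k) := by
                rw [pvStraightB]
                simp only [hc2, if_neg hc2dot, zero_add]
                exact hs
              rw [if_neg hc2dot, hs0]
              rw [if_pos (by omega : (0:Int) < k)] at ht
              rw [← ht]
              simp
      · -- straight case
        simp only [if_neg hnc] at hrun
        obtain ⟨y', x', k, hs, ht⟩ :=
          ih (pvAheadPos y x d).1 (pvAheadPos y x d).2 d (dist + 1) mv r nc hn hnc hrun
        have hk : dist + 1 ≤ k := pvStraightB_k_le grid n _ _ _ _ _ _ _ hs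
        refine ⟨y', x', k, ?_, pvTurnsB_mono grid n _ _ _ _ _ ht⟩
        rw [pvStraightB]
        simp only [hn, if_neg hnc]
        exact hs

/-- the row finder returns an in-row index holding a robot char. -/
theorem pvFindRow_sound :
    ∀ (cs : List Char) (j j' : Int) (c : Char), pvFindRow cs j = some (j', c) →
      ∃ k : Nat, j' = j + k ∧ cs[k]? = some c ∧ pvIsRobot c = true := by
  intro cs
  induction cs with
  | nil => intro j j' c h; simp [pvFindRow] at h
  | cons c0 cs ih =>
    intro j j' c h
    rw [pvFindRow] at h
    by_cases hr : pvIsRobot c0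
    · simp only [if_pos hr, Option.some_inj, Prod.mk.injEq] at h
      obtain ⟨h1, h2⟩ := h
      subst h1; subst h2
      exact ⟨0, by simp, by simp, hr⟩
    · simp only [if_neg hr] at h
      obtain ⟨k, hk, hget, hrob⟩ := ih (j + 1) j' c h
      exact ⟨k + 1, by push_cast; omega, by simpa using hget, hrob⟩

/-- the grid finder returns a row index whose row the row finder accepts. -/
theorem pvFindRows_sound :
    ∀ (rows : List (List Char)) (i y x : Int) (d : Char), pvFindRows rows i = some (y, x, d) →
      ∃ k : Nat, y = i + k ∧ ∃ row, rows[k]? = some row ∧ pvFindRow row 0 = some (x, d) := by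
  intro rows
  induction rows with
  | nil => intro i y x d h; simp [pvFindRows] at h
  | cons r rs ih =>
    intro i y x d h
    rw [pvFindRows] at h
    cases hr : pvFindRow r 0 with
    | some jc =>
      obtain ⟨j, c⟩ := jc
      simp only [hr, Option.some_inj, Prod.mk.injEq] at h
      obtain ⟨h1, h2, h3⟩ := h
      subst h1; subst h2; subst h3
      exact ⟨0, by simp, r, by simp, hr⟩
    | none =>
      simp only [hr] at h
      obtain ⟨k, hk, row, hget, hfr⟩ := ih (i + 1) y x d h
      exact ⟨k + 1, by push_cast; omega, row, by simpa using hget, hfr⟩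

/-- the finder really finds a robot char at the returned coordinates. -/
theorem pvFind_cell (grid : List (List Char)) :
    ∀ y x d, pvFind grid = some (y, x, d) → pvCell grid y x = some d ∧ pvIsRobot d = true := by
  intro y x d h
  obtain ⟨k, hy, row, hget, hfr⟩ := pvFindRows_sound grid 0 y x d h
  obtain ⟨k2, hx, hgc, hrob⟩ := pvFindRow_sound row 0 x d hfr
  refine ⟨?_, hrob⟩
  unfold pvCell
  have hy' : y = (k : Int) := by omega
  have hx' : x = (k2 : Int) := by omega
  rw [hy', hx', PySem.List.pyGet?_natCast, hget, Option.bind_some, PySem.List.pyGet?_natCast]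
  exact hgc

-- ===== VERDICT (by name: the statement is the Claim_ definition above) =====
theorem determine_moves_spec : Claim_equal_determine_moves := by
  intro g _hdom hpre
  unfold Pre_determine_moves at hpre
  unfold Spec_determine_moves determine_moves determine_moves_alt
  cases hf : pvFind (pvPad g) with
  | none => simp [hf] at hpre
  | some s =>
    obtain ⟨y, x, d⟩ := s
    simp only [hf, Option.bind_some, Option.isSome_iff_exists] at hpre
    obtain ⟨mv, hrun⟩ := hpre
    obtain ⟨hcell, hrobot⟩ := pvFind_cell (pvPad g) y x d hf
    have hdot : d ≠ '.' := by
      intro h; rw [h] at hrobot; simp [pvIsRobot] at hrobot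
    obtain ⟨y', x', k, hs, ht⟩ := pvBridge (pvPad g) (pvFuel g) y x d 0 [] mv d hcell hdot hrun
    simp only [hf, hrun, hs, List.nil_append] at *
    rw [PySem.List.slice_to_neg_one, ht]
    rfl
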